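-- pv_equiv track=rewrite | github.com/iakonk/MyHomeRepos | python/examples/educative/next-letter.py | findNextLetter
-- ===== SOURCE A (Python) =====
-- def findNextLetter(arr, key):
--     first, last = arr[0], arr[-1]
--     if key > last or key < first:
--         return first
--
--     start, end = 0, len(arr) - 1
--     while start <= end:
--         mid = start + (end - start) // 2
--         if key < arr[mid]:
--             end = mid - 1
--         else:
--             # key  >= mid
--             start = mid + 1
--
--     return arr[start % len(arr)]
-- ===== SOURCE B (Python) =====
-- def findNextLetter(arr, key):
--     for c in arr:
--         if c > key:
--             return c
--     return arr[0]
-- ===== Notes on version B (the rewrite author's own statement) =====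
-- stated objective: simpler
-- what changed: Replaces the guarded binary search with a single linear scan that returns the first letter strictly greater than key and wraps to arr[0] when none exists.
-- outside the precondition, e.g. on findNextLetter(['a', 'z', 'a', 'a', 'y'], 'b'): A returns 'y', B returns 'z'
import Mathlib
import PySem

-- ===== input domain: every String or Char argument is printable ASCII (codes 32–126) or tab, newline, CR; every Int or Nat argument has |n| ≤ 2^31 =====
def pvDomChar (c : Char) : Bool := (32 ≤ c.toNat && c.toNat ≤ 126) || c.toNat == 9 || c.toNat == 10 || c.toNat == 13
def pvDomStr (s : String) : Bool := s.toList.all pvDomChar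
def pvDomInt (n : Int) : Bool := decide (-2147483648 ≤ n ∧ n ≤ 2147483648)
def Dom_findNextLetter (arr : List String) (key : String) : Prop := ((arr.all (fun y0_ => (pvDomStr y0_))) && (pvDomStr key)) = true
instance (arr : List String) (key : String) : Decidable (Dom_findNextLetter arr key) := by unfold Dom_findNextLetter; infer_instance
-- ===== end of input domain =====

-- B replaces A's guarded binary search by a plain linear scan (first letter > key, wrapping
-- to arr[0]); objective: simpler. Equality is claimed on nonempty sorted input (Pre_ below).

-- ===== PORT A =====
-- the while loop of A, with a fuel argument only to make it total (arr.length + 1 steps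
-- always suffice: hi - lo strictly decreases); `mid = start + (end - start) // 2` is
-- written out at each occurrence
def bsLoop (arr : List String) (key : String) : Nat → Int → Int → Int
  | 0, lo, _ => lo
  | n + 1, lo, hi =>
    if lo ≤ hi then
      if key < PySem.List.pyGetD arr (lo + PySem.Int.floordiv (hi - lo) 2) "" then
        bsLoop arr key n lo (lo + PySem.Int.floordiv (hi - lo) 2 - 1)
      else
        bsLoop arr key n (lo + PySem.Int.floordiv (hi - lo) 2 + 1) hi
    else lo

def findNextLetter (arr : List String) (key : String) : String :=
  match PySem.List.pyGet? arr 0, PySem.List.pyGet? arr (-1) with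
  | some first, some last =>
    if last < key ∨ key < first then first
    else
      PySem.List.pyGetD arr
        (PySem.Int.mod (bsLoop arr key (arr.length + 1) 0 ((arr.length : Int) - 1))
          (arr.length : Int)) ""
  | _, _ => ""  -- arr[0] / arr[-1] raise IndexError (arr = []), excluded by Pre_

-- ===== PORT B =====
-- the for loop of B: first element strictly greater than key
def altLoop (key : String) : List String → Option String
  | [] => none
  | c :: rest => if key < c then some c else altLoop key rest

def findNextLetter_alt (arr : List String) (key : String) : String :=
  match altLoop key arr with
  | some c => c
  | none =>
    match PySem.List.pyGet? arr 0 with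
    | some v => v
    | none => ""  -- arr[0] raises IndexError (arr = []), excluded by Pre_

-- ===== PRECONDITION & SPEC =====
-- Pre_ excludes the empty list (both programs raise IndexError there) and the unsorted
-- lists on which the spot A's bisection lands is an artefact of the search path; unsorted
-- inputs whose answer cannot depend on the order (key below the first element, or no
-- element above key) stay inside.
def Pre_findNextLetter (arr : List String) (key : String) : Prop :=
  arr ≠ [] ∧
    (List.Pairwise (fun a b => a = b ∨ a.toList < b.toList) arr ∨
      key.toList < (arr.getD 0 "").toList ∨
      ∀ c ∈ arr, ¬ key.toList < c.toList)
instance (arr : List String) (key : String) : Decidable (Pre_findNextLetter arr key) := by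
  unfold Pre_findNextLetter; infer_instance

def pvWitness_findNextLetter : List String × String := (["a", "b", "d"], "b")

def Spec_findNextLetter (arr : List String) (key : String) (out : String) : Prop := out = findNextLetter_alt arr key
instance (arr : List String) (key : String) (out : String) : Decidable (Spec_findNextLetter arr key out) := by unfold Spec_findNextLetter; infer_instance

-- ===== CLAIM (what is proved, stated in full; the proofs are below) =====
def Claim_equal_findNextLetter : Prop := ∀ (arr : List String) (key : String), Dom_findNextLetter arr key → Pre_findNextLetter arr key → Spec_findNextLetter arr key (findNextLetter arr key)

-- ===== LEMMAS AND PROOFS =====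

-- sortedness as monotonicity of positional access
lemma sorted_getD_mono {arr : List String} (hs : List.Pairwise (· ≤ ·) arr)
    {i j : Nat} (hij : i ≤ j) (hj : j < arr.length) :
    arr.getD i "" ≤ arr.getD j "" := by
  rcases Nat.lt_or_eq_of_le hij with h | h
  · rw [List.getD_eq_getElem arr "" (lt_trans h hj), List.getD_eq_getElem arr "" hj]
    exact (List.pairwise_iff_getElem.mp hs) i j (lt_trans h hj) hj h
  · subst h; rfl

-- A's while loop returns the least index s with key < arr[s] (or len, if none), given the
-- stated invariants on [lo, hi]
lemma bsLoop_spec (arr : List String) (key : String)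
    (hs : List.Pairwise (· ≤ ·) arr) :
    ∀ (n : Nat) (lo hi : Int), (hi + 1 - lo).toNat ≤ n →
      0 ≤ lo → hi < (arr.length : Int) → lo ≤ hi + 1 →
      (∀ i : Nat, i < arr.length → (i : Int) < lo → ¬ key < arr.getD i "") →
      (∀ i : Nat, i < arr.length → hi < (i : Int) → key < arr.getD i "") →
      lo ≤ bsLoop arr key n lo hi ∧ bsLoop arr key n lo hi ≤ (arr.length : Int) ∧
      (∀ i : Nat, i < arr.length → (i : Int) < bsLoop arr key n lo hi → ¬ key < arr.getD i "") ∧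
      (∀ i : Nat, i < arr.length → bsLoop arr key n lo hi ≤ (i : Int) → key < arr.getD i "") := by
  intro n
  induction n with
  | zero =>
    intro lo hi hfuel hlo hhi hlohi hlow hhigh
    rw [bsLoop]
    exact ⟨le_refl _, by omega, hlow, fun i hi1 hi2 => hhigh i hi1 (by omega)⟩
  | succ n ih =>
    intro lo hi hfuel hlo hhi hlohi hlow hhigh
    by_cases hle : lo ≤ hi
    · have hdiv : 0 ≤ PySem.Int.floordiv (hi - lo) 2 ∧
          PySem.Int.floordiv (hi - lo) 2 ≤ hi - lo := by
        rw [PySem.Int.floordiv_eq_ediv_of_pos (by norm_num)]; omega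
      set m : Int := lo + PySem.Int.floordiv (hi - lo) 2 with hm
      have hmlo : lo ≤ m := by omega
      have hmhi : m ≤ hi := by omega
      have hmlen : m < (arr.length : Int) := by omega
      have hm0 : 0 ≤ m := by omega
      have hget : PySem.List.pyGetD arr m "" = arr.getD m.toNat "" := by
        rw [PySem.List.pyGetD_eq_getElem arr "" hm0 hmlen,
            List.getD_eq_getElem arr "" (by omega)]
      rw [bsLoop, if_pos hle]
      by_cases hcmp : key < PySem.List.pyGetD arr m "" <;>
        simp only [← hm, hcmp, if_true, if_false]
      · -- key < arr[mid] : end = mid - 1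
        have hfuel' : (m - 1 + 1 - lo).toNat ≤ n := by
          have := hdiv.2
          rw [PySem.Int.floordiv_eq_ediv_of_pos (by norm_num)] at hm
          omega
        refine ih lo (m - 1) hfuel' hlo (by omega) (by omega) hlow ?_
        intro i hi1 hi2
        have : m.toNat ≤ i := by omega
        have hmono := sorted_getD_mono hs this hi1
        rw [hget] at hcmp
        exact lt_of_lt_of_le hcmp hmono
      · -- key >= arr[mid] : start = mid + 1
        have hfuel' : (hi + 1 - (m + 1)).toNat ≤ n := by omega
        have hinv : ∀ i : Nat, i < arr.length → (i : Int) < m + 1 → ¬ key < arr.getD i "" := by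
          intro i hi1 hi2
          have : i ≤ m.toNat := by omega
          have hmono := sorted_getD_mono hs this (by omega)
          rw [hget] at hcmp
          exact fun hk => hcmp (lt_of_lt_of_le hk hmono)
        obtain ⟨h1, h2, h3, h4⟩ := ih (m + 1) hi hfuel' (by omega) hhi (by omega) hinv hhigh
        exact ⟨le_trans (by omega) h1, h2, h3, h4⟩
    · rw [bsLoop, if_neg hle]
      exact ⟨le_refl _, by omega, hlow, fun i hi1 hi2 => hhigh i hi1 (by omega)⟩

lemma altLoop_eq_none {key : String} {arr : List String}
    (h : ∀ c ∈ arr, ¬ key < c) : altLoop key arr = none := by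
  induction arr with
  | nil => rfl
  | cons c rest ih =>
    rw [altLoop, if_neg (h c (List.mem_cons_self))]
    exact ih (fun x hx => h x (List.mem_cons_of_mem c hx))

lemma altLoop_eq_some {key : String} :
    ∀ (arr : List String) (s : Nat), s < arr.length → key < arr.getD s "" →
      (∀ i : Nat, i < s → ¬ key < arr.getD i "") →
      altLoop key arr = some (arr.getD s "") := by
  intro arr
  induction arr with
  | nil => intro s hs; simp at hs
  | cons c rest ih =>
    intro s hs hks hlow
    by_cases hc : key < c
    · have hs0 : s = 0 := by
        by_contra h0
        exact hlow 0 (Nat.pos_of_ne_zero h0) hc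
      subst hs0
      rw [altLoop, if_pos hc]; rfl
    · have hs0 : s ≠ 0 := fun h0 => hc (by simpa [h0] using hks)
      obtain ⟨t, rfl⟩ : ∃ t, s = t + 1 := ⟨s - 1, by omega⟩
      rw [altLoop, if_neg hc]
      exact ih t (by simpa using hs) (by simpa using hks)
        (fun i hi => by simpa using hlow (i + 1) (by omega))

-- the three agreement regions of Pre_, one lemma each

-- A's loop never finds key < arr[mid] when no element exceeds key, so start ends at end+1
lemma bsLoop_all_le (arr : List String) (key : String)
    (hall : ∀ m : Int, ¬ key < PySem.List.pyGetD arr m "") :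
    ∀ (n : Nat) (lo hi : Int), (hi + 1 - lo).toNat ≤ n → lo ≤ hi + 1 →
      bsLoop arr key n lo hi = hi + 1 := by
  intro n
  induction n with
  | zero =>
    intro lo hi hfuel hlohi
    rw [bsLoop]; omega
  | succ n ih =>
    intro lo hi hfuel hlohi
    by_cases hle : lo ≤ hi
    · have hdiv : 0 ≤ PySem.Int.floordiv (hi - lo) 2 ∧
          PySem.Int.floordiv (hi - lo) 2 ≤ hi - lo := by
        rw [PySem.Int.floordiv_eq_ediv_of_pos (by norm_num)]; omega
      rw [bsLoop, if_pos hle, if_neg (hall _)]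
      exact ih _ _ (by omega) (by omega)
    · rw [bsLoop, if_neg hle]; omega

lemma agree_of_sorted (arr : List String) (key : String) (hne : arr ≠ [])
    (hs : List.Pairwise (· ≤ ·) arr) :
    findNextLetter arr key = findNextLetter_alt arr key := by
  have hlen : 0 < arr.length := List.length_pos_of_ne_nil hne
  have h0 : PySem.List.pyGet? arr 0 = some (arr.getD 0 "") := by
    rw [PySem.List.pyGet?_zero, List.getElem?_eq_getElem hlen,
        List.getD_eq_getElem arr "" hlen]
  have hlast : PySem.List.pyGet? arr (-1) = some (arr.getD (arr.length - 1) "") := by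
    rw [PySem.List.pyGet?_neg_one, List.getLast?_eq_some_getLast hne,
        List.getLast_eq_getElem hne, List.getD_eq_getElem arr "" (by omega)]
  unfold findNextLetter findNextLetter_alt
  rw [h0, hlast]
  show (if arr.getD (arr.length - 1) "" < key ∨ key < arr.getD 0 "" then arr.getD 0 ""
        else PySem.List.pyGetD arr
          (PySem.Int.mod (bsLoop arr key (arr.length + 1) 0 ((arr.length : Int) - 1))
          (arr.length : Int)) "") =
       (match altLoop key arr with
        | some c => c
        | none => arr.getD 0 "")
  by_cases hcond : arr.getD (arr.length - 1) "" < key ∨ key < arr.getD 0 ""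
  · rw [if_pos hcond]
    rcases hcond with hgt | hlt
    · -- key > last: every element is ≤ last < key, so the scan finds nothing and wraps
      have hnone : altLoop key arr = none := by
        apply altLoop_eq_none
        intro c hc
        obtain ⟨i, hi, rfl⟩ := List.mem_iff_getElem.mp hc
        have : arr.getD i "" ≤ arr.getD (arr.length - 1) "" :=
          sorted_getD_mono hs (by omega) (by omega)
        rw [List.getD_eq_getElem arr "" hi] at this
        exact lt_asymm (lt_of_le_of_lt this hgt)
      rw [hnone]
    · -- key < first: the scan returns the first element
      rw [altLoop_eq_some arr 0 hlen hlt (fun i hi => by omega)]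
  · rw [if_neg hcond]
    push Not at hcond
    have hspec := bsLoop_spec arr key hs (arr.length + 1) 0 ((arr.length : Int) - 1)
      (by omega) (by omega) (by omega) (by omega)
      (fun i hi1 hi2 => by omega)
      (fun i hi1 hi2 => by omega)
    obtain ⟨hslo, hshi, hbelow, habove⟩ := hspec
    set s : Int := bsLoop arr key (arr.length + 1) 0 ((arr.length : Int) - 1) with hsdef
    by_cases hcase : s < (arr.length : Int)
    · -- some element is greater: both return arr[s]
      have hmod : PySem.Int.mod s (arr.length : Int) = s := by
        rw [PySem.Int.mod_eq_emod_of_pos (by omega)]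
        exact Int.emod_eq_of_lt hslo hcase
      rw [hmod, PySem.List.pyGetD_eq_getElem arr "" hslo hcase,
          ← List.getD_eq_getElem arr "" (by omega)]
      rw [altLoop_eq_some arr s.toNat (by omega)
        (habove s.toNat (by omega) (by omega))
        (fun i hi => hbelow i (by omega) (by omega))]
    · -- no element is greater: s = len, A wraps via len % len = 0, B via the fallback
      have hseq : s = (arr.length : Int) := by omega
      have hmod : PySem.Int.mod s (arr.length : Int) = 0 := by
        rw [hseq, PySem.Int.mod_eq_emod_of_pos (by omega), Int.emod_self]
      have hnone : altLoop key arr = none := by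
        apply altLoop_eq_none
        intro c hc
        obtain ⟨i, hi, rfl⟩ := List.mem_iff_getElem.mp hc
        rw [← List.getD_eq_getElem arr "" hi]
        exact hbelow i hi (by omega)
      rw [hmod, hnone, PySem.List.pyGetD_eq_getElem arr "" (by omega) (by omega),
          ← List.getD_eq_getElem arr "" (by omega)]
      norm_num

lemma agree_of_key_lt (arr : List String) (key : String) (hne : arr ≠ [])
    (hlt : key < arr.getD 0 "") :
    findNextLetter arr key = findNextLetter_alt arr key := by
  have hlen : 0 < arr.length := List.length_pos_of_ne_nil hne
  have h0 : PySem.List.pyGet? arr 0 = some (arr.getD 0 "") := by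
    rw [PySem.List.pyGet?_zero, List.getElem?_eq_getElem hlen,
        List.getD_eq_getElem arr "" hlen]
  have hlast : PySem.List.pyGet? arr (-1) = some (arr.getD (arr.length - 1) "") := by
    rw [PySem.List.pyGet?_neg_one, List.getLast?_eq_some_getLast hne,
        List.getLast_eq_getElem hne, List.getD_eq_getElem arr "" (by omega)]
  unfold findNextLetter findNextLetter_alt
  rw [h0, hlast]
  show (if arr.getD (arr.length - 1) "" < key ∨ key < arr.getD 0 "" then arr.getD 0 ""
        else PySem.List.pyGetD arr
          (PySem.Int.mod (bsLoop arr key (arr.length + 1) 0 ((arr.length : Int) - 1))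
          (arr.length : Int)) "") =
       (match altLoop key arr with
        | some c => c
        | none => arr.getD 0 "")
  rw [if_pos (Or.inr hlt), altLoop_eq_some arr 0 hlen hlt (fun i hi => by omega)]

lemma agree_of_none_gt (arr : List String) (key : String) (hne : arr ≠ [])
    (hall : ∀ c ∈ arr, ¬ key < c) :
    findNextLetter arr key = findNextLetter_alt arr key := by
  have hlen : 0 < arr.length := List.length_pos_of_ne_nil hne
  have h0 : PySem.List.pyGet? arr 0 = some (arr.getD 0 "") := by
    rw [PySem.List.pyGet?_zero, List.getElem?_eq_getElem hlen,
        List.getD_eq_getElem arr "" hlen]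
  have hlast : PySem.List.pyGet? arr (-1) = some (arr.getD (arr.length - 1) "") := by
    rw [PySem.List.pyGet?_neg_one, List.getLast?_eq_some_getLast hne,
        List.getLast_eq_getElem hne, List.getD_eq_getElem arr "" (by omega)]
  have hnone : altLoop key arr = none := altLoop_eq_none hall
  unfold findNextLetter findNextLetter_alt
  rw [h0, hlast]
  show (if arr.getD (arr.length - 1) "" < key ∨ key < arr.getD 0 "" then arr.getD 0 ""
        else PySem.List.pyGetD arr
          (PySem.Int.mod (bsLoop arr key (arr.length + 1) 0 ((arr.length : Int) - 1))
          (arr.length : Int)) "") =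
       (match altLoop key arr with
        | some c => c
        | none => arr.getD 0 "")
  have hallD : ∀ m : Int, ¬ key < PySem.List.pyGetD arr m "" := by
    intro m
    by_cases h : PySem.Raise.InRange arr.length m
    · exact hall _ (PySem.List.pyGetD_mem arr "" h)
    · rw [PySem.List.pyGetD_of_none arr m ""
        ((PySem.List.pyGet?_eq_none_iff arr m).mpr h)]
      simp [String.lt_iff_toList_lt]
  by_cases hcond : arr.getD (arr.length - 1) "" < key ∨ key < arr.getD 0 ""
  · rw [if_pos hcond, hnone]
  · rw [if_neg hcond, hnone,
        bsLoop_all_le arr key hallD (arr.length + 1) 0 ((arr.length : Int) - 1)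
          (by omega) (by omega)]
    have hmod : PySem.Int.mod ((arr.length : Int) - 1 + 1) (arr.length : Int) = 0 := by
      have : (arr.length : Int) - 1 + 1 = (arr.length : Int) := by omega
      rw [this, PySem.Int.mod_eq_emod_of_pos (by omega), Int.emod_self]
    rw [hmod, PySem.List.pyGetD_eq_getElem arr "" (by omega) (by omega),
        ← List.getD_eq_getElem arr "" (by omega)]
    norm_num

-- ===== VERDICT (by name: the statement is the Claim_ definition above) =====
theorem findNextLetter_spec : Claim_equal_findNextLetter := by
  intro arr key _hdom ⟨hne, hpre⟩
  unfold Spec_findNextLetter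
  rcases hpre with hs' | hkf | hall
  · refine agree_of_sorted arr key hne (hs'.imp ?_)
    rintro a b (rfl | h)
    · exact le_refl a
    · exact le_of_lt (String.lt_iff_toList_lt.mpr h)
  · exact agree_of_key_lt arr key hne (String.lt_iff_toList_lt.mpr hkf)
  · exact agree_of_none_gt arr key hne
      (fun c hc h => hall c hc (String.lt_iff_toList_lt.mp h))
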